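-- pv_equiv track=rewrite | github.com/E-Williamson121/Unique-Crosswordles | uniquetripleanalysis.py | bucket_puzzles_by_info
-- ===== SOURCE A (Python) =====
-- def numtoternary(x):
--     nums = []
--     while x > 0:
--         x, r = divmod(x, 3)
--         nums.append(r)
--     while len(nums) < 5: nums.append(0)
--     return nums[::-1]
--
-- def sort_dict(mydict):
--     sorted_dict = {}
--     for key in sorted(mydict):
--         sorted_dict[key] = mydict[key]
--     return sorted_dict
--
-- def bucket_puzzles_by_info(puzzles):
--     number_puzzles = {}
--     number_counts = {}
--     for puzzle in puzzles:
--         words, nums = puzzle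
--         s = sum(map(lambda x: sum(numtoternary(x)), nums[1:]))
--         if s in number_puzzles.keys():
--             number_puzzles[s].append(puzzle)
--             number_counts[s] += 1
--         else:
--             number_puzzles[s] = [puzzle]
--             number_counts[s] = 1
--     return number_puzzles, sort_dict(number_counts)
-- ===== SOURCE B (Python) =====
-- def digitsum3(x):
--     if x <= 0:
--         return 0
--     q, r = divmod(x, 3)
--     return r + digitsum3(q)
--
-- def bucket_puzzles_by_info(puzzles):
--     buckets = {}
--     for puzzle in puzzles:
--         s = sum(digitsum3(x) for x in puzzle[1][1:])
--         buckets.setdefault(s, []).append(puzzle)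
--     counts = {s: len(buckets[s]) for s in sorted(buckets)}
--     return buckets, counts
-- ===== Notes on version B (the rewrite author's own statement) =====
-- stated objective: simpler
-- what changed: Single pass maintains only the score->bucket grouping (with a recursive base-3 digit-sum instead of building, padding and reversing a digit list); the sorted count dict is derived afterwards as len of each bucket instead of being maintained alongside.
import Mathlib
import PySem

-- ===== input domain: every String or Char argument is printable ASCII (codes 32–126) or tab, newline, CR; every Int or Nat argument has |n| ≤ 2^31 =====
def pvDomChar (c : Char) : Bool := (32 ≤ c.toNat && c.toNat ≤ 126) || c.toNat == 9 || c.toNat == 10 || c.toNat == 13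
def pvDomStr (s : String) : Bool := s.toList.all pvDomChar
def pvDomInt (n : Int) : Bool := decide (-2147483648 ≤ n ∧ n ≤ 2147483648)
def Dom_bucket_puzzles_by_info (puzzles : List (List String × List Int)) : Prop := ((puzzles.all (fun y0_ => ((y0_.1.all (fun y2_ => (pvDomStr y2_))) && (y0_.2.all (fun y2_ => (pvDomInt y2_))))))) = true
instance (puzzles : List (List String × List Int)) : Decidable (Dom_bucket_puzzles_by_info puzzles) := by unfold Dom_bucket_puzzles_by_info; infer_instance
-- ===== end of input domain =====

-- B drops the in-loop count maintenance: it only groups puzzles by score (computed by a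
-- recursive base-3 digit sum instead of building/padding/reversing a digit list), then
-- derives the sorted counts as the length of each bucket.  Objective: simpler.

-- ===== PORT A =====
-- while x > 0: x, r = divmod(x, 3); nums.append(r)
def numtoternaryLoop (x : Int) (nums : List Int) : List Int :=
  if h : x > 0 then
    numtoternaryLoop (PySem.Int.floordiv x 3) (nums ++ [PySem.Int.mod x 3])
  else nums
termination_by x.toNat
decreasing_by
  have h3 : (0:Int) < 3 := by norm_num
  have := PySem.Int.floordiv_eq_ediv_of_pos (a := x) h3
  omega

-- while len(nums) < 5: nums.append(0)
def padLoop (nums : List Int) : List Int :=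
  if h : nums.length < 5 then padLoop (nums ++ [0]) else nums
termination_by 5 - nums.length
decreasing_by simp; omega

def numtoternary (x : Int) : List Int :=
  (padLoop (numtoternaryLoop x [])).reverse

def sort_dict (mydict : PySem.Dict Int Int) : PySem.Dict Int Int :=
  (PySem.List.sorted mydict.keys (fun k => k) false).foldl
    (fun sd key => sd.insert key (mydict.getD key 0)) PySem.Dict.empty
  -- mydict[key] with key drawn from mydict's keys: getD 0 is exact here (key always present)

def bucket_puzzles_by_info (puzzles : List (List String × List Int)) : (List (Int × List (List String × List Int))) × (List (Int × Int)) :=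
  let st := puzzles.foldl
    (fun (st : PySem.Dict Int (List (List String × List Int)) × PySem.Dict Int Int) puzzle =>
      let nums := puzzle.2
      let s := ((PySem.List.slice nums (some 1) none).map (fun x => (numtoternary x).sum)).sum
      if st.1.contains s then
        (st.1.modify s [] (fun l => l ++ [puzzle]), st.2.modify s 0 (fun c => c + 1))
      else
        (st.1.insert s [puzzle], st.2.insert s 1))
    (PySem.Dict.empty, PySem.Dict.empty)
  (st.1.items, (sort_dict st.2).items)

-- ===== PORT B =====
def digitsum3 (x : Int) : Int :=
  if h : x ≤ 0 then 0
  else PySem.Int.mod x 3 + digitsum3 (PySem.Int.floordiv x 3)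
termination_by x.toNat
decreasing_by
  have h3 : (0:Int) < 3 := by norm_num
  have := PySem.Int.floordiv_eq_ediv_of_pos (a := x) h3
  omega

def bucket_puzzles_by_info_alt (puzzles : List (List String × List Int)) : (List (Int × List (List String × List Int))) × (List (Int × Int)) :=
  let buckets := puzzles.foldl
    (fun (d : PySem.Dict Int (List (List String × List Int))) puzzle =>
      let s := ((PySem.List.slice puzzle.2 (some 1) none).map digitsum3).sum
      d.modify s [] (fun l => l ++ [puzzle]))   -- buckets.setdefault(s, []).append(puzzle)
    PySem.Dict.empty
  -- {s: len(buckets[s]) for s in sorted(buckets)} — keys are distinct, so the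
  -- comprehension's association list is exactly this map over the sorted keys
  (buckets.items,
   (PySem.List.sorted buckets.keys (fun k => k) false).map
     (fun k => (k, ((buckets.getD k []).length : Int))))

-- ===== PRECONDITION & SPEC =====
def Spec_bucket_puzzles_by_info (puzzles : List (List String × List Int)) (out : (List (Int × List (List String × List Int))) × (List (Int × Int))) : Prop := out = bucket_puzzles_by_info_alt puzzles
instance (puzzles : List (List String × List Int)) (out : (List (Int × List (List String × List Int))) × (List (Int × Int))) : Decidable (Spec_bucket_puzzles_by_info puzzles out) := by unfold Spec_bucket_puzzles_by_info; infer_instance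

-- ===== CLAIM (what is proved, stated in full; the proofs are below) =====
def Claim_equal_bucket_puzzles_by_info : Prop := ∀ (puzzles : List (List String × List Int)), Dom_bucket_puzzles_by_info puzzles → Spec_bucket_puzzles_by_info puzzles (bucket_puzzles_by_info puzzles)

-- ===== LEMMAS AND PROOFS =====

theorem sum_numtoternaryLoop (x : Int) (nums : List Int) :
    (numtoternaryLoop x nums).sum = nums.sum + digitsum3 x := by
  have unf : ∀ y : Int, 0 < y →
      digitsum3 y = PySem.Int.mod y 3 + digitsum3 (PySem.Int.floordiv y 3) := by
    intro y hy; rw [digitsum3, dif_neg (by omega)]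
  induction x, nums using numtoternaryLoop.induct with
  | case1 x nums h ih =>
      rw [numtoternaryLoop, dif_pos h, ih, unf x h]
      simp [List.sum_append]; ring
  | case2 x nums h =>
      rw [numtoternaryLoop, dif_neg h, digitsum3, dif_pos (by omega)]
      simp

theorem sum_padLoop (nums : List Int) : (padLoop nums).sum = nums.sum := by
  induction nums using padLoop.induct with
  | case1 nums h ih => rw [padLoop, dif_pos h, ih]; simp
  | case2 nums h => rw [padLoop, dif_neg h]

theorem sum_numtoternary (x : Int) : (numtoternary x).sum = digitsum3 x := by
  rw [numtoternary, List.sum_reverse, sum_padLoop, sum_numtoternaryLoop]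
  simp

-- the invariant carried through A's loop (with the score already rewritten via
-- sum_numtoternary), relating it to B's loop
theorem loop_invariant (l : List (List String × List Int))
    (d : PySem.Dict Int (List (List String × List Int))) (c : PySem.Dict Int Int)
    (hk : c.keys = d.keys)
    (hv : ∀ k, c.getD k 0 = ((d.getD k []).length : Int)) :
    (l.foldl (fun (st : PySem.Dict Int (List (List String × List Int)) × PySem.Dict Int Int) puzzle =>
        let s := ((PySem.List.slice puzzle.2 (some 1) none).map digitsum3).sum
        if st.1.contains s then
          (st.1.modify s [] (fun l => l ++ [puzzle]), st.2.modify s 0 (fun c => c + 1))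
        else
          (st.1.insert s [puzzle], st.2.insert s 1)) (d, c)).1 = l.foldl (fun (d : PySem.Dict Int (List (List String × List Int))) puzzle =>
        let s := ((PySem.List.slice puzzle.2 (some 1) none).map digitsum3).sum
        d.modify s [] (fun l => l ++ [puzzle])) d
    ∧ (l.foldl (fun (st : PySem.Dict Int (List (List String × List Int)) × PySem.Dict Int Int) puzzle =>
        let s := ((PySem.List.slice puzzle.2 (some 1) none).map digitsum3).sum
        if st.1.contains s then
          (st.1.modify s [] (fun l => l ++ [puzzle]), st.2.modify s 0 (fun c => c + 1))
        else
          (st.1.insert s [puzzle], st.2.insert s 1)) (d, c)).2.keys = (l.foldl (fun (st : PySem.Dict Int (List (List String × List Int)) × PySem.Dict Int Int) puzzle =>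
        let s := ((PySem.List.slice puzzle.2 (some 1) none).map digitsum3).sum
        if st.1.contains s then
          (st.1.modify s [] (fun l => l ++ [puzzle]), st.2.modify s 0 (fun c => c + 1))
        else
          (st.1.insert s [puzzle], st.2.insert s 1)) (d, c)).1.keys
    ∧ ∀ k, ((l.foldl (fun (st : PySem.Dict Int (List (List String × List Int)) × PySem.Dict Int Int) puzzle =>
        let s := ((PySem.List.slice puzzle.2 (some 1) none).map digitsum3).sum
        if st.1.contains s then
          (st.1.modify s [] (fun l => l ++ [puzzle]), st.2.modify s 0 (fun c => c + 1))
        else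
          (st.1.insert s [puzzle], st.2.insert s 1)) (d, c)).2.getD k 0)
        = (((l.foldl (fun (st : PySem.Dict Int (List (List String × List Int)) × PySem.Dict Int Int) puzzle =>
        let s := ((PySem.List.slice puzzle.2 (some 1) none).map digitsum3).sum
        if st.1.contains s then
          (st.1.modify s [] (fun l => l ++ [puzzle]), st.2.modify s 0 (fun c => c + 1))
        else
          (st.1.insert s [puzzle], st.2.insert s 1)) (d, c)).1.getD k []).length : Int) := by
  induction l generalizing d c with
  | nil => exact ⟨rfl, hk, hv⟩
  | cons p l ih =>
      simp only [List.foldl_cons]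
      have hcd : c.contains ((PySem.List.slice p.2 (some 1) none).map digitsum3).sum
          = d.contains ((PySem.List.slice p.2 (some 1) none).map digitsum3).sum := by
        rw [PySem.Dict.contains_eq_decide_mem_keys, PySem.Dict.contains_eq_decide_mem_keys, hk]
      set s : Int := ((PySem.List.slice p.2 (some 1) none).map digitsum3).sum with hs
      by_cases hd : d.contains s = true
      · rw [if_pos hd]
        apply ih
        · rw [PySem.Dict.keys_modify, PySem.Dict.keys_modify,
            PySem.Dict.keys_insert_of_contains _ _ (hcd.trans hd),
            PySem.Dict.keys_insert_of_contains _ _ hd, hk]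
        · intro k
          rw [PySem.Dict.getD_modify, PySem.Dict.getD_modify]
          by_cases hks : k = s
          · subst hks
            simp [hv s]
          · simp only [if_neg hks, hv k]
      · rw [if_neg hd]
        have hne : d.contains s = false := eq_false_of_ne_true hd
        have hB : d.modify s [] (fun l => l ++ [p]) = d.insert s [p] := by
          show d.insert s (d.getD s [] ++ [p]) = d.insert s [p]
          rw [PySem.Dict.getD_of_not_contains _ _ hne, List.nil_append]
        rw [hB]
        apply ih
        · rw [PySem.Dict.keys_insert_of_not_contains _ _ (hcd.trans hne),
            PySem.Dict.keys_insert_of_not_contains _ _ hne, hk]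
        · intro k
          rw [PySem.Dict.getD_insert, PySem.Dict.getD_insert]
          by_cases hks : k = s
          · simp [hks]
          · simp only [if_neg hks, hv k]

-- ===== VERDICT (by name: the statement is the Claim_ definition above) =====
theorem bucket_puzzles_by_info_spec : Claim_equal_bucket_puzzles_by_info := by
  intro puzzles _dom
  unfold Spec_bucket_puzzles_by_info bucket_puzzles_by_info bucket_puzzles_by_info_alt sort_dict
  have hstep :
      (fun (st : PySem.Dict Int (List (List String × List Int)) × PySem.Dict Int Int)
           (puzzle : List String × List Int) =>
        let nums := puzzle.2
        let s := ((PySem.List.slice nums (some 1) none).map (fun x => (numtoternary x).sum)).sum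
        if st.1.contains s then
          (st.1.modify s [] (fun l => l ++ [puzzle]), st.2.modify s 0 (fun c => c + 1))
        else
          (st.1.insert s [puzzle], st.2.insert s 1))
      = (fun (st : PySem.Dict Int (List (List String × List Int)) × PySem.Dict Int Int)
           (puzzle : List String × List Int) =>
        let s := ((PySem.List.slice puzzle.2 (some 1) none).map digitsum3).sum
        if st.1.contains s then
          (st.1.modify s [] (fun l => l ++ [puzzle]), st.2.modify s 0 (fun c => c + 1))
        else
          (st.1.insert s [puzzle], st.2.insert s 1)) := by
    funext st puzzle
    simp only [sum_numtoternary]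
  rw [hstep]
  obtain ⟨h1, h2, h3⟩ := loop_invariant puzzles PySem.Dict.empty PySem.Dict.empty rfl
    (fun k => rfl)
  have hndB : (puzzles.foldl
      (fun (d : PySem.Dict Int (List (List String × List Int))) puzzle =>
        let s := ((PySem.List.slice puzzle.2 (some 1) none).map digitsum3).sum
        d.modify s [] (fun l => l ++ [puzzle])) PySem.Dict.empty).keys.Nodup := by
    exact PySem.Dict.nodup_keys_foldl_modify_key puzzles
      (fun puzzle => ((PySem.List.slice puzzle.2 (some 1) none).map digitsum3).sum)
      [] (fun _ puzzle l => l ++ [puzzle]) PySem.Dict.empty PySem.Dict.nodup_keys_empty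
  refine Prod.ext ?_ ?_
  · simpa using congrArg PySem.Dict.items h1
  · show ((PySem.List.sorted _ _ _).foldl _ PySem.Dict.empty).items = _
    rw [h1] at h2 h3
    rw [h2]
    have hnds : (PySem.List.sorted (puzzles.foldl
        (fun (d : PySem.Dict Int (List (List String × List Int))) puzzle =>
          let s := ((PySem.List.slice puzzle.2 (some 1) none).map digitsum3).sum
          d.modify s [] (fun l => l ++ [puzzle])) PySem.Dict.empty).keys
        (fun k => k) false).Nodup :=
      (PySem.List.sorted_perm _ _ _).nodup_iff.mpr hndB
    rw [PySem.Dict.items_foldl_insert_fresh _ (fun a => a) _ PySem.Dict.empty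
      (fun a _ => PySem.Dict.contains_empty a) (by simpa using hnds)]
    simp only [h3]
    simp [PySem.Dict.items, PySem.Dict.empty]
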